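-- pv_equiv track=rewrite | github.com/Dong-Jun-Shin/Study_Algorithm_Python | programmers/level3/c30_72415.py | get_ctrl_codi_list
-- ===== SOURCE A (Python) =====
-- def get_ctrl_codi_list(card_codi_list, n, x, y):
--     ctrl_codi_list = []
--     for i in range(x - 1, -1, -1):
--         if (i, y) in card_codi_list:
--             ctrl_codi_list.append((i, y))
--             break
--     else:
--         ctrl_codi_list.append((0, y))
--     for i in range(y + 1, n):
--         if (x, i) in card_codi_list:
--             ctrl_codi_list.append((x, i))
--             break
--     else:
--         ctrl_codi_list.append((x, n - 1))
--     for i in range(x + 1, n):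
--         if (i, y) in card_codi_list:
--             ctrl_codi_list.append((i, y))
--             break
--     else:
--         ctrl_codi_list.append((n - 1, y))
--     for i in range(y - 1, -1, -1):
--         if (x, i) in card_codi_list:
--             ctrl_codi_list.append((x, i))
--             break
--     else:
--         ctrl_codi_list.append((x, 0))
--     return ctrl_codi_list
-- ===== SOURCE B (Python) =====
-- def get_ctrl_codi_list(card_codi_list, n, x, y):
--     # One pass over the cards per axis instead of scanning board coordinates:
--     # aggregate the nearest card by min/max over the cards sharing row x / column y.
--     rows_y = [r for (r, c) in card_codi_list if c == y]
--     cols_x = [c for (r, c) in card_codi_list if r == x]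
--     up = max([r for r in rows_y if 0 <= r < x], default=0)
--     right = min([c for c in cols_x if y < c < n], default=n - 1)
--     down = min([r for r in rows_y if x < r < n], default=n - 1)
--     left = max([c for c in cols_x if 0 <= c < y], default=0)
--     return [(up, y), (x, right), (down, y), (x, left)]
-- ===== Notes on version B (the rewrite author's own statement) =====
-- stated objective: faster
-- what changed: Instead of walking board coordinates outward in each of the four directions with a list-membership test at every step, B makes one pass over the card list per axis and answers each direction as a min/max aggregation over the cards sharing row x or column y, with the same fallback as the aggregation default.
import Mathlib
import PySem

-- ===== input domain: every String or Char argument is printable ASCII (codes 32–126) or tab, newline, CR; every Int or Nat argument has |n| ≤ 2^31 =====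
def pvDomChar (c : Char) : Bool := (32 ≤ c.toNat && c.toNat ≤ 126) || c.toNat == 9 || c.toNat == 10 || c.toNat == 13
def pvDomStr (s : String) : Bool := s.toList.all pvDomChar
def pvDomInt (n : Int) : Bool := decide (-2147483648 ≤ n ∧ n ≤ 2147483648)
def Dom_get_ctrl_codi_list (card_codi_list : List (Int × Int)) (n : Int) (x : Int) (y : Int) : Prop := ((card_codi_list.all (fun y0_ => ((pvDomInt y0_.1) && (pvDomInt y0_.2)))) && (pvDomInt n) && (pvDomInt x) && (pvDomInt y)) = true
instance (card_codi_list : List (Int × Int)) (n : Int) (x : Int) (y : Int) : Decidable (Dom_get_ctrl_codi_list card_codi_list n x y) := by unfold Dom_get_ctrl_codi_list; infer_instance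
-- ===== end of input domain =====

-- B replaces A's four outward board-coordinate scans (each step an O(m) membership test)
-- by one aggregation pass over the card list per axis (min/max of candidate rows/cols).


-- ===== PORT A =====
-- each `for i in range(...): if (…) in card_codi_list: append; break / else: append fallback`
-- is the first element of the range satisfying the membership test, else the fallback
def get_ctrl_codi_list (card_codi_list : List (Int × Int)) (n : Int) (x : Int) (y : Int) : List (Int × Int) :=
  let up : Int × Int :=
    match (PySem.List.pyRange (x - 1) (-1) (-1)).find? (fun i => card_codi_list.contains (i, y)) with
    | some i => (i, y)
    | none => (0, y)
  let right : Int × Int :=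
    match (PySem.List.pyRange (y + 1) n 1).find? (fun i => card_codi_list.contains (x, i)) with
    | some i => (x, i)
    | none => (x, n - 1)
  let down : Int × Int :=
    match (PySem.List.pyRange (x + 1) n 1).find? (fun i => card_codi_list.contains (i, y)) with
    | some i => (i, y)
    | none => (n - 1, y)
  let left : Int × Int :=
    match (PySem.List.pyRange (y - 1) (-1) (-1)).find? (fun i => card_codi_list.contains (x, i)) with
    | some i => (x, i)
    | none => (x, 0)
  [up, right, down, left]

-- ===== PORT B =====
def get_ctrl_codi_list_alt (card_codi_list : List (Int × Int)) (n : Int) (x : Int) (y : Int) : List (Int × Int) :=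
  let rows_y : List Int := (card_codi_list.filter (fun p => p.2 == y)).map (fun p => p.1)
  let cols_x : List Int := (card_codi_list.filter (fun p => p.1 == x)).map (fun p => p.2)
  let up : Int := PySem.List.maxD (rows_y.filter (fun r => decide (0 ≤ r) && decide (r < x))) (fun v => v) 0
  let right : Int := PySem.List.minD (cols_x.filter (fun c => decide (y < c) && decide (c < n))) (fun v => v) (n - 1)
  let down : Int := PySem.List.minD (rows_y.filter (fun r => decide (x < r) && decide (r < n))) (fun v => v) (n - 1)
  let left : Int := PySem.List.maxD (cols_x.filter (fun c => decide (0 ≤ c) && decide (c < y))) (fun v => v) 0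
  [(up, y), (x, right), (down, y), (x, left)]

-- ===== PRECONDITION & SPEC =====
def Spec_get_ctrl_codi_list (card_codi_list : List (Int × Int)) (n : Int) (x : Int) (y : Int) (out : List (Int × Int)) : Prop := out = get_ctrl_codi_list_alt card_codi_list n x y
instance (card_codi_list : List (Int × Int)) (n : Int) (x : Int) (y : Int) (out : List (Int × Int)) : Decidable (Spec_get_ctrl_codi_list card_codi_list n x y out) := by unfold Spec_get_ctrl_codi_list; infer_instance

-- ===== CLAIM (what is proved, stated in full; the proofs are below) =====
def Claim_equal_get_ctrl_codi_list : Prop := ∀ (card_codi_list : List (Int × Int)) (n : Int) (x : Int) (y : Int), Dom_get_ctrl_codi_list card_codi_list n x y → Spec_get_ctrl_codi_list card_codi_list n x y (get_ctrl_codi_list card_codi_list n x y)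

-- ===== LEMMAS AND PROOFS =====

-- the first member of a strictly increasing candidate list that occurs in `vals`
-- is the minimum of the `vals`-elements inside the candidate bounds (default d when none)
theorem pvFirst_eq_minD (l vals : List Int) (bnd : Int → Bool) (d : Int)
    (hl : l.Pairwise (· < ·))
    (hmem : ∀ i : Int, i ∈ l ↔ bnd i = true) :
    (match l.find? (fun i => vals.contains i) with | some i => i | none => d)
      = PySem.List.minD (vals.filter bnd) (fun v => v) d := by
  cases h : l.find? (fun i => vals.contains i) with
  | none =>
    have hno := List.find?_eq_none.mp h
    have hS : vals.filter bnd = [] := by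
      rw [List.eq_nil_iff_forall_not_mem]
      intro c hc
      rw [List.mem_filter] at hc
      exact hno c ((hmem c).mpr hc.2) (List.contains_iff_mem.mpr hc.1)
    simp [hS, PySem.List.minD, PySem.List.min?]
  | some m =>
    obtain ⟨hpm, as, bs, heq, hfirst⟩ := List.find?_eq_some_iff_append.mp h
    have hmS : m ∈ vals.filter bnd := by
      rw [List.mem_filter]
      refine ⟨List.contains_iff_mem.mp hpm, (hmem m).mp ?_⟩
      rw [heq]; exact List.mem_append_right _ (List.mem_cons_self)
    have hle : ∀ j ∈ l, vals.contains j = true → m ≤ j := by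
      intro j hj hpj
      rw [heq] at hj hl
      rcases List.mem_append.mp hj with hja | hjb
      · exact absurd hpj (by simpa using hfirst j hja)
      · rcases List.mem_cons.mp hjb with rfl | hjb
        · exact le_refl _
        · exact le_of_lt ((List.pairwise_cons.mp (List.pairwise_append.mp hl).2.1).1 j hjb)
    cases hmin : PySem.List.min? (vals.filter bnd) (fun v => v) with
    | none =>
      exact absurd ((PySem.List.min?_eq_none_iff _ _).mp hmin)
        (by intro hE; rw [hE] at hmS; simp at hmS)
    | some m' =>
      have hm'S := PySem.List.min?_mem hmin
      have hlow := PySem.List.min?_isMin hmin m hmS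
      rw [List.mem_filter] at hm'S
      have h2 := hle m' ((hmem m').mpr hm'S.2) (List.contains_iff_mem.mpr hm'S.1)
      simp [PySem.List.minD, hmin]
      omega

-- dual: strictly decreasing candidate list / maximum
theorem pvFirst_eq_maxD (l vals : List Int) (bnd : Int → Bool) (d : Int)
    (hl : l.Pairwise (· > ·))
    (hmem : ∀ i : Int, i ∈ l ↔ bnd i = true) :
    (match l.find? (fun i => vals.contains i) with | some i => i | none => d)
      = PySem.List.maxD (vals.filter bnd) (fun v => v) d := by
  cases h : l.find? (fun i => vals.contains i) with
  | none =>
    have hno := List.find?_eq_none.mp h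
    have hS : vals.filter bnd = [] := by
      rw [List.eq_nil_iff_forall_not_mem]
      intro c hc
      rw [List.mem_filter] at hc
      exact hno c ((hmem c).mpr hc.2) (List.contains_iff_mem.mpr hc.1)
    simp [hS, PySem.List.maxD, PySem.List.max?]
  | some m =>
    obtain ⟨hpm, as, bs, heq, hfirst⟩ := List.find?_eq_some_iff_append.mp h
    have hmS : m ∈ vals.filter bnd := by
      rw [List.mem_filter]
      refine ⟨List.contains_iff_mem.mp hpm, (hmem m).mp ?_⟩
      rw [heq]; exact List.mem_append_right _ (List.mem_cons_self)
    have hge : ∀ j ∈ l, vals.contains j = true → j ≤ m := by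
      intro j hj hpj
      rw [heq] at hj hl
      rcases List.mem_append.mp hj with hja | hjb
      · exact absurd hpj (by simpa using hfirst j hja)
      · rcases List.mem_cons.mp hjb with rfl | hjb
        · exact le_refl _
        · exact le_of_lt ((List.pairwise_cons.mp (List.pairwise_append.mp hl).2.1).1 j hjb)
    cases hmax : PySem.List.max? (vals.filter bnd) (fun v => v) with
    | none =>
      exact absurd ((PySem.List.max?_eq_none_iff _ _).mp hmax)
        (by intro hE; rw [hE] at hmS; simp at hmS)
    | some m' =>
      have hm'S := PySem.List.max?_mem hmax
      have hhigh := PySem.List.max?_isMax hmax m hmS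
      rw [List.mem_filter] at hm'S
      have h2 := hge m' ((hmem m').mpr hm'S.2) (List.contains_iff_mem.mpr hm'S.1)
      simp [PySem.List.maxD, hmax]
      omega

-- membership bridges: (i, y) ∈ card list ↔ i ∈ B's row list (and the column analogue)
theorem pvContains_rows (cl : List (Int × Int)) (y i : Int) :
    ((cl.filter (fun p => p.2 == y)).map (fun p => p.1)).contains i = cl.contains (i, y) := by
  rw [Bool.eq_iff_iff]
  simp only [List.contains_iff_mem, List.mem_map, List.mem_filter, beq_iff_eq]
  constructor
  · rintro ⟨⟨a, b⟩, ⟨hin, rfl⟩, rfl⟩; exact hin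
  · intro h; exact ⟨(i, y), ⟨h, rfl⟩, rfl⟩

theorem pvContains_cols (cl : List (Int × Int)) (x i : Int) :
    ((cl.filter (fun p => p.1 == x)).map (fun p => p.2)).contains i = cl.contains (x, i) := by
  rw [Bool.eq_iff_iff]
  simp only [List.contains_iff_mem, List.mem_map, List.mem_filter, beq_iff_eq]
  constructor
  · rintro ⟨⟨a, b⟩, ⟨hin, rfl⟩, rfl⟩; exact hin
  · intro h; exact ⟨(x, i), ⟨h, rfl⟩, rfl⟩

theorem pvPairwise_gt_desc (a : Int) : (PySem.List.pyRange a (-1) (-1)).Pairwise (· > ·) := by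
  rw [PySem.List.pyRange_neg_one_eq_reverse]
  exact List.pairwise_reverse.mpr (PySem.List.pairwise_lt_pyRange_one _ _)

-- ===== VERDICT (by name: the statement is the Claim_ definition above) =====
theorem get_ctrl_codi_list_spec : Claim_equal_get_ctrl_codi_list := by
  intro cl n x y _
  unfold Spec_get_ctrl_codi_list
  simp only [get_ctrl_codi_list, get_ctrl_codi_list_alt]
  have hup := pvFirst_eq_maxD (PySem.List.pyRange (x - 1) (-1) (-1))
      ((cl.filter (fun p => p.2 == y)).map (fun p => p.1))
      (fun r => decide (0 ≤ r) && decide (r < x)) 0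
      (pvPairwise_gt_desc _)
      (by intro i; simp only [PySem.List.mem_pyRange_neg_one, Bool.and_eq_true, decide_eq_true_eq]; omega)
  have hright := pvFirst_eq_minD (PySem.List.pyRange (y + 1) n 1)
      ((cl.filter (fun p => p.1 == x)).map (fun p => p.2))
      (fun c => decide (y < c) && decide (c < n)) (n - 1)
      (PySem.List.pairwise_lt_pyRange_one _ _)
      (by intro i; simp only [PySem.List.mem_pyRange_one, Bool.and_eq_true, decide_eq_true_eq]; omega)
  have hdown := pvFirst_eq_minD (PySem.List.pyRange (x + 1) n 1)
      ((cl.filter (fun p => p.2 == y)).map (fun p => p.1))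
      (fun r => decide (x < r) && decide (r < n)) (n - 1)
      (PySem.List.pairwise_lt_pyRange_one _ _)
      (by intro i; simp only [PySem.List.mem_pyRange_one, Bool.and_eq_true, decide_eq_true_eq]; omega)
  have hleft := pvFirst_eq_maxD (PySem.List.pyRange (y - 1) (-1) (-1))
      ((cl.filter (fun p => p.1 == x)).map (fun p => p.2))
      (fun c => decide (0 ≤ c) && decide (c < y)) 0
      (pvPairwise_gt_desc _)
      (by intro i; simp only [PySem.List.mem_pyRange_neg_one, Bool.and_eq_true, decide_eq_true_eq]; omega)
  simp only [funext (fun i => pvContains_rows cl y i), funext (fun i => pvContains_cols cl x i)] at hup hright hdown hleft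
  cases h1 : (PySem.List.pyRange (x - 1) (-1) (-1)).find? (fun i => cl.contains (i, y)) <;>
    cases h2 : (PySem.List.pyRange (y + 1) n 1).find? (fun i => cl.contains (x, i)) <;>
      cases h3 : (PySem.List.pyRange (x + 1) n 1).find? (fun i => cl.contains (i, y)) <;>
        cases h4 : (PySem.List.pyRange (y - 1) (-1) (-1)).find? (fun i => cl.contains (x, i)) <;>
          (rw [h1] at hup; rw [h2] at hright; rw [h3] at hdown; rw [h4] at hleft;
           simp only [] at hup hright hdown hleft;
           simp [← hup, ← hright, ← hdown, ← hleft])
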